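/- GENERATED by tools/from_farm_form.py from prooffarm-gif/accepted/DGifDecompressLine.2/Proof.lean (a worked proof of the farm's unit `DGifDecompressLine.2`,
   accepted by the verdict) — do not edit. -/
import Gif.Spec.Units.DGifDecompressLine_2
import Gif.Spec.Proved.DGifDecompressLine_2_Lemmas

open X86 X86.User Asan ProgX.Base ProgX.Base.Spec Gif.Spec

namespace Gif.Spec.DGifDecompressLine_2

/-- **THE FIRST POP LOOP** (dgif_lib.c:883-885), from its head 106BE3H with `StackPtr ≤ k`: by induction on `k`, one round
(`dl2_round`) either leaves to the head of the main loop (106F7DH) or comes back to 106BE3H with a smaller StackPtr. -/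
theorem dl2_loop {Lay : Layout} (hLay : Lay.hi = 0x1000000) {μ : Microarch} (hμ : UserX.MicroOK μ) {u₀ : State}
    (hcode : HasCodeNat Lay u₀ Gif.L.DGifDecompressLine.entry Gif.Code.code_DGifDecompressLine.nat Gif.L.DGifDecompressLine.size)
    (h_load1 : Asan.SmallCheck Lay μ ProgX.Base.WayInv (ProgX.Base.CodeOK u₀) [.rax, .rdx] 1 ProgX.Base.L.__asan_load1_noabort.entry)
    (h_store1 : Asan.SmallCheck Lay μ ProgX.Base.WayInv (ProgX.Base.CodeOK u₀) [.rax, .rdx] 1 ProgX.Base.L.__asan_store1_noabort.entry)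
    (H : Heap) (rest : List Obj) (frames : List (Nat × FrameLayout)) (F : Forest) (R : Rd) (n m : Nat) (e : State) (ret : Word) :
    ∀ (k : Nat) (v : State),
      DGifDecompressLine.Pop Gif.L.DGifDecompressLine.at_106be3 m H rest frames F R n u₀ e ret v →
      (v.reg .rbx).toNat ≤ k →
      ReachVia Lay μ WayInv v (fun w => ∃ m', DGifDecompressLine.Head m' H rest frames F R n u₀ e ret w) := by
  intro k
  induction k with
  | zero =>
    -- `StackPtr = 0`: the round can only leave (it cannot come back with a smaller StackPtr)
    intro v hat hk
    refine (dl2_round hLay hμ hcode h_load1 h_store1 H rest frames F R n m e ret v hat).trans ?_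
    intro w hw
    rcases hw with hhead | ⟨_, hlt⟩
    · exact ReachVia.done hhead
    · omega
  | succ k ih =>
    intro v hat hk
    refine (dl2_round hLay hμ hcode h_load1 h_store1 H rest frames F R n m e ret v hat).trans ?_
    intro w hw
    rcases hw with hhead | ⟨hpop, hlt⟩
    · -- 0x106f7d: the head of the main loop
      exact ReachVia.done hhead
    · -- 0x106be3 again, `StackPtr` smaller: the induction hypothesis
      exact ih w hpop (by omega)

end Gif.Spec.DGifDecompressLine_2

/-- Segment 2 of `DGifDecompressLine` (106BE3H … 106C3FH and 107071H … 107080H; dgif_lib.c:883-885): THE FIRST POP LOOP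
`while (StackPtr != 0 && i < LineLen) Line[i++] = Stack[--StackPtr]`, from `Pop` at its head to `Head` of the main loop
(106F7DH). The loop runs at most `StackPtr ≤ 4095` rounds (`dl2_loop`, one round: `dl2_round` of Lemmas.lean). -/
theorem Gif.Spec.Proved.DGifDecompressLine_2_ok : Gif.Spec.DGifDecompressLine_2.Statement := by
  unfold Gif.Spec.DGifDecompressLine_2.Statement
  intro Lay hLay μ hμ u₀ hcode h_load1 h_store1
  unfold Gif.Spec.DGifDecompressLine.Seg2
  intro H rest frames F R n m e ret v hat
  exact Gif.Spec.DGifDecompressLine_2.dl2_loop hLay hμ hcode h_load1 h_store1 H rest frames F R n m e ret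
    (v.reg .rbx).toNat v hat (Nat.le_refl _)
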